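-- pv_equiv track=rewrite | github.com/rabumaabraham/DSA-UC-San-Diego | assembler.py | reconstruct_contigs
-- ===== SOURCE A (Python) =====
-- def reconstruct_contigs(path, k):
--     """Reconstruct contigs from Eulerian path"""
--     if not path:
--         return []
--
--     contigs = []
--     current_contig = path[0]
--
--     for i in range(1, len(path)):
--         if len(path[i]) >= k:
--             current_contig += path[i][-1]
--         else:
--             # Start new contig
--             if current_contig:
--                 contigs.append(current_contig)
--             current_contig = path[i]
--
--     if current_contig:
--         contigs.append(current_contig)
--
--     return contigs
-- ===== SOURCE B (Python) =====
-- def reconstruct_contigs(path, k):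
--     """Reconstruct contigs from Eulerian path (group-then-build decomposition)."""
--     if not path:
--         return []
--     # Pass 1: split the path into groups; a new group starts before every short element.
--     groups = []
--     current = [path[0]]
--     for e in path[1:]:
--         if len(e) < k:
--             groups.append(current)
--             current = [e]
--         else:
--             current.append(e)
--     groups.append(current)
--     # Pass 2: build each group's contig; keep only the nonempty ones.
--     contigs = []
--     for g in groups:
--         c = g[0] + ''.join(e[-1] for e in g[1:])
--         if c:
--             contigs.append(c)
--     return contigs
-- ===== Notes on version B (the rewrite author's own statement) =====
-- stated objective: alternative
-- what changed: Replaces A's single stateful scan (growing a string and flushing it on short elements) by a two-phase decomposition: first partition the path into groups starting at each short element, then build each group's contig as head + joined last characters and keep the nonempty ones.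
import Mathlib
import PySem

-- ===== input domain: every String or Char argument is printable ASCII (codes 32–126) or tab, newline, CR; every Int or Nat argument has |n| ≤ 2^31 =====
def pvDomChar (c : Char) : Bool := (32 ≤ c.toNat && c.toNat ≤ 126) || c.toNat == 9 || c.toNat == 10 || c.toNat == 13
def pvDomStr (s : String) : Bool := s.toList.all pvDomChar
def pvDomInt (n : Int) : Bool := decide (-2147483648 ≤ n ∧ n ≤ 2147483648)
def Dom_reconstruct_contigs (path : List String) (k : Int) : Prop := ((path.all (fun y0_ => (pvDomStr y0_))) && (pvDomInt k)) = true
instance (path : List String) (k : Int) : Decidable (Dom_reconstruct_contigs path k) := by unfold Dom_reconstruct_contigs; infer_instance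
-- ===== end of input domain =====

-- B rebuilds the contigs by a group-then-build two-phase decomposition instead of A's
-- single stateful scan; same cost, return values proved equal on Pre_ (where neither raises).

-- ===== PORT A =====
def pvStepA (k : Int) (st : List String × String) (e : String) : List String × String :=
  if k ≤ PySem.Str.len e then
    match PySem.Str.pyGet? e (-1) with
    | some c => (st.1, st.2 ++ String.ofList [c])
    | none => st                   -- IndexError in Python; excluded by Pre_
  else ((if st.2 = "" then st.1 else st.1 ++ [st.2]), e)

def reconstruct_contigs (path : List String) (k : Int) : List String :=
  if path = [] then []
  else
    let st := (PySem.List.pyRange 1 (path.length : Int) 1).foldl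
      (fun st i => pvStepA k st (PySem.List.pyGetD path i "")) ([], path.headD "")
    if st.2 = "" then st.1 else st.1 ++ [st.2]

-- ===== PORT B =====
def pvLastCh (e : String) : Char := (PySem.Str.pyGet? e (-1)).getD ' '   -- e[-1]; default unreachable under Pre_

def pvBuild (g : List String) : String :=
  g.headD "" ++ String.ofList ((g.drop 1).map pvLastCh)

def pvStepB (k : Int) (st : List (List String) × List String) (e : String) :
    List (List String) × List String :=
  if PySem.Str.len e < k then (st.1 ++ [st.2], [e]) else (st.1, st.2 ++ [e])

def pvEmit (acc : List String) (g : List String) : List String :=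
  let c := pvBuild g
  if c = "" then acc else acc ++ [c]

def reconstruct_contigs_alt (path : List String) (k : Int) : List String :=
  match path with
  | [] => []
  | p0 :: rest =>
    let st := rest.foldl (pvStepB k) ([], [p0])
    (st.1 ++ [st.2]).foldl pvEmit []

-- ===== PRECONDITION & SPEC =====
-- Pre_ excludes exactly the inputs on which A raises IndexError: k ≤ 0 together with an
-- empty string after the first position (the empty element is then "long" and "" [-1] raises).
def Pre_reconstruct_contigs (path : List String) (k : Int) : Prop :=
  k ≤ 0 → "" ∉ path.drop 1
instance (path : List String) (k : Int) : Decidable (Pre_reconstruct_contigs path k) := by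
  unfold Pre_reconstruct_contigs; infer_instance

def pvWitness_reconstruct_contigs : List String × Int := (["AB", "BC", "X", "CD"], 2)

def Spec_reconstruct_contigs (path : List String) (k : Int) (out : List String) : Prop := out = reconstruct_contigs_alt path k
instance (path : List String) (k : Int) (out : List String) : Decidable (Spec_reconstruct_contigs path k out) := by unfold Spec_reconstruct_contigs; infer_instance

-- ===== CLAIM (what is proved, stated in full; the proofs are below) =====
def Claim_equal_reconstruct_contigs : Prop := ∀ (path : List String) (k : Int), Dom_reconstruct_contigs path k → Pre_reconstruct_contigs path k → Spec_reconstruct_contigs path k (reconstruct_contigs path k)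

-- ===== LEMMAS AND PROOFS =====

lemma pvBuild_single (e : String) : pvBuild [e] = e := by
  simp [pvBuild]

lemma pvBuild_append (g : List String) (hg : g ≠ []) (e : String) :
    pvBuild (g ++ [e]) = pvBuild g ++ String.ofList [pvLastCh e] := by
  obtain ⟨x, g', rfl⟩ := List.exists_cons_of_ne_nil hg
  apply String.toList_inj.mp
  simp [pvBuild]

lemma stepB_prefix (k : Int) (rest : List String) (gs0 gs : List (List String)) (cur : List String) :
    rest.foldl (pvStepB k) (gs0 ++ gs, cur) =
      ((gs0 ++ (rest.foldl (pvStepB k) (gs, cur)).1), (rest.foldl (pvStepB k) (gs, cur)).2) := by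
  induction rest generalizing gs cur with
  | nil => rfl
  | cons e rest ih =>
      simp only [List.foldl_cons, pvStepB]
      split_ifs with h
      · simpa [List.append_assoc] using ih (gs ++ [cur]) [e]
      · exact ih gs (cur ++ [e])

lemma main_loop (k : Int) (rest : List String) (acc : List String) (curg : List String)
    (hc : curg ≠ [])
    (H : ∀ e ∈ rest, k ≤ PySem.Str.len e → e ≠ "") :
    (let st := rest.foldl (pvStepA k) (acc, pvBuild curg)
     if st.2 = "" then st.1 else st.1 ++ [st.2]) =
    (let st := rest.foldl (pvStepB k) ([], curg)
     (st.1 ++ [st.2]).foldl pvEmit acc) := by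
  induction rest generalizing acc curg with
  | nil => simp [pvEmit]
  | cons e rest ih =>
      by_cases h : k ≤ PySem.Str.len e
      · have he : e ≠ "" := H e (by simp) h
        have hel : e.toList ≠ [] :=
          fun hh => he (String.toList_inj.mp (by simp [hh]))
        have hget : PySem.List.pyGet? e.toList (-1) = some (e.toList.getLast hel) := by
          simp [PySem.List.pyGet?_neg_one, List.getLast?_eq_getLast_of_ne_nil hel]
        have hlast : pvLastCh e = e.toList.getLast hel := by
          simp [pvLastCh, PySem.Str.pyGet?, hget]
        have hA : pvStepA k (acc, pvBuild curg) e = (acc, pvBuild (curg ++ [e])) := by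
          simp only [pvStepA]
          rw [if_pos h]
          simp [PySem.Str.pyGet?, hget, pvBuild_append curg hc e, hlast]
        have hB : pvStepB k (([] : List (List String)), curg) e = ([], curg ++ [e]) := by
          simp only [pvStepB]
          rw [if_neg (not_lt.mpr h)]
        simp only [List.foldl_cons, hA, hB]
        exact ih acc (curg ++ [e]) (by simp) (fun x hx => H x (by simp [hx]))
      · have hk : PySem.Str.len e < k := lt_of_not_ge h
        have hA : pvStepA k (acc, pvBuild curg) e =
            ((if pvBuild curg = "" then acc else acc ++ [pvBuild curg]), e) := by
          simp only [pvStepA]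
          rw [if_neg (not_le.mpr hk)]
        have hB : pvStepB k (([] : List (List String)), curg) e = ([curg], [e]) := by
          simp only [pvStepB]
          rw [if_pos hk]
          simp
        simp only [List.foldl_cons, hA, hB]
        have hIH := ih (if pvBuild curg = "" then acc else acc ++ [pvBuild curg]) [e]
          (by simp) (fun x hx => H x (by simp [hx]))
        rw [pvBuild_single] at hIH
        rw [show ([curg] : List (List String)) = [curg] ++ [] from rfl,
          stepB_prefix k rest [curg] [] [e]]
        simp only [hIH]
        simp [pvEmit]

-- ===== VERDICT (by name: the statement is the Claim_ definition above) =====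
theorem reconstruct_contigs_spec : Claim_equal_reconstruct_contigs := by
  intro path k hDom hPre
  unfold Spec_reconstruct_contigs
  cases path with
  | nil => rfl
  | cons p0 rest =>
      have H : ∀ e ∈ rest, k ≤ PySem.Str.len e → e ≠ "" := by
        intro e he hle hcontra
        subst hcontra
        have hk0 : k ≤ 0 := by simpa [PySem.Str.len_eq] using hle
        exact hPre hk0 (by simpa using he)
      simp only [reconstruct_contigs, reconstruct_contigs_alt, if_neg (List.cons_ne_nil p0 rest)]
      rw [PySem.List.foldl_pyRange_pyGetD' (p0 :: rest) "" (pvStepA k) ([], (p0 :: rest).headD "") (a := 1) (by omega)]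
      simp only [List.drop_succ_cons, List.drop_zero, List.headD_cons, Int.toNat_one]
      have hm := main_loop k rest [] [p0] (by simp) H
      rw [pvBuild_single] at hm
      exact hm
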